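-- pv_equiv track=rewrite | github.com/jonnylester94/python-katas | src/get_distinct_letters/get_distinct_letters.py | get_distinct_letters
-- ===== SOURCE A (Python) =====
-- def get_distinct_letters(str1, str2):
--
-- 	if str1 == str2:
-- 		return str1
-- 	else:
-- 		combined_string = str1 + str2
-- 		new_string = ""
-- 		for letter in combined_string:
-- 			if combined_string.count(letter) == 1:
-- 				new_string += letter
-- 		a = sorted(new_string)
-- 		return ''.join(a)
-- ===== SOURCE B (Python) =====
-- def get_distinct_letters(str1, str2):
--     if str1 == str2:
--         return str1
--     s = sorted(str1 + str2)
--     out = []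
--     i = 0
--     n = len(s)
--     while i < n:
--         j = i
--         while j < n and s[j] == s[i]:
--             j += 1
--         if j - i == 1:
--             out.append(s[i])
--         i = j
--     return ''.join(out)
-- ===== Notes on version B (the rewrite author's own statement) =====
-- stated objective: faster
-- what changed: Replaced A's per-character .count() scan over the combined string followed by a final sort with sorting the combined string once and doing a single run-length pass that keeps characters whose run has length 1 (no final sort needed).
import Mathlib
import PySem

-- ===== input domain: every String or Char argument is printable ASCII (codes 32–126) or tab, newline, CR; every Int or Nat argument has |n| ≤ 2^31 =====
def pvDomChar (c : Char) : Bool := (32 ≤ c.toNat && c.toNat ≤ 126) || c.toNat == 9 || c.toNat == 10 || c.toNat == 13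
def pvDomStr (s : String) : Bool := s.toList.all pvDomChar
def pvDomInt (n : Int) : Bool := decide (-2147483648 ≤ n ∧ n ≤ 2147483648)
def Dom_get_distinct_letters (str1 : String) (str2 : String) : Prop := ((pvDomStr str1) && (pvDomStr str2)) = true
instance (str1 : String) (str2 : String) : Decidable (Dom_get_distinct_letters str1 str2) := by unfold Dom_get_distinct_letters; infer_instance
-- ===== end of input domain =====

-- B sorts the combined string once and keeps the characters whose consecutive run has length 1,
-- instead of A's per-character count scan followed by a final sort (objective: faster, O(n log n) vs O(n^2)).

-- ===== PORT A =====
-- combined_string.count(letter) with a single-character needle equals the character count of the char list.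
def get_distinct_letters (str1 : String) (str2 : String) : String :=
  if str1 == str2 then str1
  else
    let combined := str1.toList ++ str2.toList
    let new_string := combined.foldl (fun acc letter =>
      if combined.count letter == 1 then acc ++ [letter] else acc) []
    String.mk (PySem.List.sorted new_string (fun c => c) false)

-- ===== PORT B =====
-- run-length scan of an (already sorted) char list: keep chars whose run has length 1
def bRuns : List Char → List Char
  | [] => []
  | c :: rest =>
    let run := rest.takeWhile (· == c)
    let rest' := rest.dropWhile (· == c)
    if run.isEmpty then c :: bRuns rest' else bRuns rest'
termination_by l => l.length
decreasing_by
  all_goals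
    simp only [List.length_cons]
    exact Nat.lt_succ_of_le (List.length_dropWhile_le _ _)

def get_distinct_letters_alt (str1 : String) (str2 : String) : String :=
  if str1 == str2 then str1
  else
    String.mk (bRuns (PySem.List.sorted (str1.toList ++ str2.toList) (fun c => c) false))

-- ===== PRECONDITION & SPEC =====
def Spec_get_distinct_letters (str1 : String) (str2 : String) (out : String) : Prop := out = get_distinct_letters_alt str1 str2
instance (str1 : String) (str2 : String) (out : String) : Decidable (Spec_get_distinct_letters str1 str2 out) := by unfold Spec_get_distinct_letters; infer_instance

-- ===== CLAIM (what is proved, stated in full; the proofs are below) =====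
def Claim_equal_get_distinct_letters : Prop := ∀ (str1 : String) (str2 : String), Dom_get_distinct_letters str1 str2 → Spec_get_distinct_letters str1 str2 (get_distinct_letters str1 str2)

-- ===== LEMMAS AND PROOFS =====

-- every element of the run taken at the head equals the head character
theorem run_elem_eq (c : Char) (rest : List Char) :
    ∀ d ∈ rest.takeWhile (· == c), d = c := fun _ hd => by
  simpa using List.mem_takeWhile_imp hd

-- after dropping the head's run from a ≤-sorted tail, every remaining element is strictly larger
theorem dropWhile_gt (c : Char) (rest : List Char)
    (hp : (c :: rest).Pairwise (· ≤ ·)) :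
    ∀ d ∈ rest.dropWhile (· == c), c < d := by
  intro d hd
  cases hr' : rest.dropWhile (· == c) with
  | nil => simp [hr'] at hd
  | cons f t' =>
    have hf : (f == c) = false := by
      have := List.head_dropWhile_not (· == c) (l := rest) (by simp [hr'])
      simpa [hr'] using this
    have hfne : f ≠ c := by simpa using hf
    have hfmem0 : f ∈ rest.dropWhile (· == c) := by rw [hr']; exact List.mem_cons_self
    have hfmem : f ∈ rest := (List.dropWhile_sublist _).subset hfmem0
    have hcf : c ≤ f := (List.pairwise_cons.mp hp).1 f hfmem
    have hclt : c < f := lt_of_le_of_ne hcf (Ne.symm hfne)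
    have hrp : (rest.dropWhile (· == c)).Pairwise (· ≤ ·) :=
      ((List.pairwise_cons.mp hp).2).sublist (List.dropWhile_sublist _)
    rw [hr'] at hd hrp
    rcases List.mem_cons.mp hd with rfl | hdt
    · exact hclt
    · exact lt_of_lt_of_le hclt ((List.pairwise_cons.mp hrp).1 d hdt)

-- on a ≤-sorted list, the run-length scan IS the count-equals-one filter
theorem bRuns_eq_filter : ∀ (s : List Char), s.Pairwise (· ≤ ·) →
    bRuns s = s.filter (fun c => s.count c == 1)
  | [], _ => by simp [bRuns]
  | c :: rest, hs => by
    have hrest : rest.Pairwise (· ≤ ·) := (List.pairwise_cons.mp hs).2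
    have hdec : rest = rest.takeWhile (· == c) ++ rest.dropWhile (· == c) :=
      (List.takeWhile_append_dropWhile).symm
    have hrunc := run_elem_eq c rest
    have hgt := dropWhile_gt c rest hs
    have hp' : (rest.dropWhile (· == c)).Pairwise (· ≤ ·) :=
      hrest.sublist (List.dropWhile_sublist _)
    have IH := bRuns_eq_filter (rest.dropWhile (· == c)) hp'
    have hr'c : (rest.dropWhile (· == c)).count c = 0 :=
      List.count_eq_zero.mpr (fun h => lt_irrefl c (hgt c h))
    have hruncnt : (rest.takeWhile (· == c)).count c = (rest.takeWhile (· == c)).length :=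
      List.count_eq_length.mpr (fun b hb => by simp [hrunc b hb])
    have hccount : (c :: rest).count c = 1 + (rest.takeWhile (· == c)).length := by
      rw [List.count_cons]
      conv_lhs => rw [hdec]
      rw [List.count_append, hruncnt, hr'c]
      simp [Nat.add_comm]
    have hdcount : ∀ d ∈ rest.dropWhile (· == c),
        (c :: rest).count d = (rest.dropWhile (· == c)).count d := by
      intro d hd
      have hdc : d ≠ c := ne_of_gt (hgt d hd)
      have hrun0 : (rest.takeWhile (· == c)).count d = 0 :=
        List.count_eq_zero.mpr (fun h => hdc (hrunc d h))
      rw [List.count_cons]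
      conv_lhs => rw [hdec]
      rw [List.count_append, hrun0]
      simp [Ne.symm hdc]
    cases hrunE : rest.takeWhile (· == c) with
    | nil =>
      have hrr : rest.dropWhile (· == c) = rest := by
        conv_rhs => rw [hdec]
        rw [hrunE]; simp
      have hqc : ((c :: rest).count c == 1) = true := by
        rw [hccount, hrunE]; simp
      rw [show bRuns (c :: rest) = c :: bRuns (rest.dropWhile (· == c)) by
        rw [bRuns]; simp [hrunE]]
      rw [List.filter_cons, hqc]
      simp only [if_true]
      rw [IH, hrr]
      refine congrArg (c :: ·) ?_
      exact (List.filter_congr (fun d hd => by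
        rw [← hrr] at hd
        rw [hdcount d hd, hrr])).symm
    | cons x xs =>
      have hqc : ((c :: rest).count c == 1) = false := by
        rw [hccount, hrunE]; simp
      rw [show bRuns (c :: rest) = bRuns (rest.dropWhile (· == c)) by
        rw [bRuns]; simp [hrunE]]
      rw [List.filter_cons, hqc]
      simp only [Bool.false_eq_true, if_false]
      have hfr : (rest.takeWhile (· == c)).filter (fun d => (c :: rest).count d == 1) = [] := by
        apply List.filter_eq_nil_iff.mpr
        intro d hd
        rw [hrunc d hd, hqc]
        decide
      have hsplit : rest.filter (fun d => (c :: rest).count d == 1)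
          = (rest.takeWhile (· == c)).filter (fun d => (c :: rest).count d == 1)
            ++ (rest.dropWhile (· == c)).filter (fun d => (c :: rest).count d == 1) := by
        rw [← List.filter_append, List.takeWhile_append_dropWhile]
      rw [hsplit, hfr, List.nil_append, IH]
      exact (List.filter_congr (fun d hd => by rw [hdcount d hd])).symm
termination_by s => s.length
decreasing_by
  simp only [List.length_cons]
  exact Nat.lt_succ_of_le (List.length_dropWhile_le _ _)

-- main bridge: A's "filter by count then sort" equals B's "sort then run-scan"
theorem sorted_filter_eq_bRuns (l : List Char) :
    PySem.List.sorted (l.filter (fun c => l.count c == 1)) (fun c => c) false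
      = bRuns (PySem.List.sorted l (fun c => c) false) := by
  set s := PySem.List.sorted l (fun c => c) false with hsdef
  have hsp : s.Pairwise (· ≤ ·) := PySem.List.sorted_pairwise l (fun c => c)
  have hperm : s.Perm l := PySem.List.sorted_perm l (fun c => c) false
  have hcount : ∀ a, s.count a = l.count a := hperm.count_eq
  have hfe : s.filter (fun c => s.count c == 1) = s.filter (fun c => l.count c == 1) :=
    List.filter_congr (fun d _ => by rw [hcount d])
  rw [bRuns_eq_filter s hsp, hfe]
  apply PySem.List.sorted_eq_of_perm_of_pairwise_lt
  · exact hperm.filter _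
  · have hle : (s.filter (fun c => l.count c == 1)).Pairwise (· ≤ ·) :=
      hsp.sublist (List.filter_sublist)
    have hnd : (s.filter (fun c => l.count c == 1)).Nodup := by
      rw [List.nodup_iff_count_le_one]
      intro a
      by_cases ha : a ∈ s.filter (fun c => l.count c == 1)
      · have hpa : (l.count a == 1) = true := (List.mem_filter.mp ha).2
        have h1 : l.count a = 1 := by simpa using hpa
        calc (s.filter (fun c => l.count c == 1)).count a
            ≤ s.count a := (List.filter_sublist).count_le a
          _ = l.count a := hcount a
          _ = 1 := h1
      · simp [List.count_eq_zero.mpr ha]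
    exact (hle.and hnd).imp (fun h => lt_of_le_of_ne h.1 h.2)

-- ===== VERDICT (by name: the statement is the Claim_ definition above) =====
theorem get_distinct_letters_spec : Claim_equal_get_distinct_letters := by
  intro str1 str2 _
  unfold Spec_get_distinct_letters get_distinct_letters get_distinct_letters_alt
  by_cases h : str1 == str2
  · simp [h]
  · simp only [h]
    rw [PySem.List.foldl_append_if]
    simp only [List.nil_append, List.map_id']
    exact congrArg String.mk (sorted_filter_eq_bRuns _)
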